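-- pv_equiv track=rewrite | github.com/Chimson/Languages | PythonMaster/lab1.py | wordCounts
-- ===== SOURCE A (Python) =====
-- def wordCounts(wordList):
--
--     counts = {}
--
--     for word in wordList:
--         first = word[0].upper()
--         if first not in counts:
--             counts[ first ] = 1
--         else:
--             counts[ first ] +=1
--     return counts
-- ===== SOURCE B (Python) =====
-- def wordCounts(wordList):
--     keys = [word[0].upper() for word in wordList]
--     return {k: keys.count(k) for k in dict.fromkeys(keys)}
-- ===== Notes on version B (the rewrite author's own statement) =====
-- stated objective: simpler
-- what changed: Replaces the branching dict-accumulation loop with a two-phase comprehension: extract all uppercase first letters once, then build the dict directly as {k: keys.count(k) for k in dict.fromkeys(keys)} (first-occurrence key order, counting with list.count instead of an accumulator).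
import Mathlib
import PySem

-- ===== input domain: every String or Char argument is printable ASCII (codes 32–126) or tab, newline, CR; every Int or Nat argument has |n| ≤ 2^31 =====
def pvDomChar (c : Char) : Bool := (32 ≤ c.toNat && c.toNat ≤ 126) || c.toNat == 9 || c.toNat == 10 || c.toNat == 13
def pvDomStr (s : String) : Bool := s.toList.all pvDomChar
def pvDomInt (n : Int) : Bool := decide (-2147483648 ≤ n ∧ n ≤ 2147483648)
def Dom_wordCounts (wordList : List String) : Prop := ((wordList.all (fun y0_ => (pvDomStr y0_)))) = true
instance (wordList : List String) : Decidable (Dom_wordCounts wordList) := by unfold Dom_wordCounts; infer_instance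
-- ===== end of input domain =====

-- B replaces A's branching dict-accumulation loop by a two-phase comprehension
-- (extract keys, then {k: keys.count(k) for k in keys}); objective: simpler, not faster.


-- ===== PORT A =====
-- word[0].upper(): the uppercased one-character string at index 0 ("" only when
-- word = "", which Pre_ excludes — there Python raises IndexError).
def pvFirstUpper (word : String) : String :=
  match PySem.Str.pyGet? word 0 with
  | some c => PySem.Str.upper (String.ofList [c])
  | none => ""

def wordCounts (wordList : List String) : List (String × Int) :=
  (wordList.foldl
    (fun counts word =>
      let first := pvFirstUpper word
      if counts.contains first = false then counts.insert first 1
      else counts.insert first (counts.getD first 0 + 1))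
    PySem.Dict.empty).items

-- ===== PORT B =====
def wordCounts_alt (wordList : List String) : List (String × Int) :=
  let keys := wordList.map pvFirstUpper
  ((PySem.List.dedup keys).foldl
      (fun d k => d.insert k ((keys.count k : Int))) PySem.Dict.empty).items

-- ===== PRECONDITION & SPEC =====
-- Pre_ excludes lists containing an empty-string word: there Python A (and B alike)
-- raises IndexError on word[0].
def Pre_wordCounts (wordList : List String) : Prop := ∀ w ∈ wordList, w ≠ ""
instance (wordList : List String) : Decidable (Pre_wordCounts wordList) := by unfold Pre_wordCounts; infer_instance

def pvWitness_wordCounts : List String := ["apple", "Ant", "banana", "!x"]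

def Spec_wordCounts (wordList : List String) (out : List (String × Int)) : Prop := out = wordCounts_alt wordList
instance (wordList : List String) (out : List (String × Int)) : Decidable (Spec_wordCounts wordList out) := by unfold Spec_wordCounts; infer_instance

-- ===== CLAIM (what is proved, stated in full; the proofs are below) =====
def Claim_equal_wordCounts : Prop := ∀ (wordList : List String), Dom_wordCounts wordList → Pre_wordCounts wordList → Spec_wordCounts wordList (wordCounts wordList)

-- ===== LEMMAS AND PROOFS =====

-- A's branching body is the standard counter step (when the key is absent, getD gives 0, so both branches insert getD + 1).
theorem wordCounts_eq_counter_items (wordList : List String) :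
    wordCounts wordList = (PySem.Dict.counter (wordList.map pvFirstUpper)).items := by
  unfold wordCounts
  rw [show (fun (counts : PySem.Dict String Int) word =>
        let first := pvFirstUpper word
        if counts.contains first = false then counts.insert first 1
        else counts.insert first (counts.getD first 0 + 1))
      = (fun (counts : PySem.Dict String Int) word =>
          counts.insert (pvFirstUpper word) (counts.getD (pvFirstUpper word) 0 + 1)) from by
    funext counts word
    by_cases h : counts.contains (pvFirstUpper word) = false
    · simp [h, PySem.Dict.getD_of_not_contains counts 0 h]
    · simp [h]]
  rw [← List.foldl_map (g := fun (d : PySem.Dict String Int) k => d.insert k (d.getD k 0 + 1))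
        (f := pvFirstUpper),
      PySem.Dict.foldl_insert_getD_add_one_eq_counter]

-- B's comprehension fold over a key list, run with any constant value function:
-- items are the deduplicated keys paired with their values.
theorem items_foldl_insert_fn (f : String → Int) (ks s : List String) :
    (ks.foldl (fun d k => d.insert k (f k))
        (PySem.Dict.mk (s.map (fun k => (k, f k))))).items
      = (PySem.Set.update s ks).map (fun k => (k, f k)) := by
  induction ks generalizing s with
  | nil => simp [PySem.Set.update]
  | cons k t ih =>
    have hkeys : (PySem.Dict.mk (s.map (fun k => (k, f k)))).keys = s := by
      simp only [PySem.Dict.keys, List.map_map]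
      exact List.map_id'' (by intro x; rfl) s
    have hcont : (PySem.Dict.mk (s.map (fun k => (k, f k)))).contains k = decide (k ∈ s) := by
      rw [PySem.Dict.contains_eq_decide_mem_keys, hkeys]
    by_cases hmem : k ∈ s
    · have hins : (PySem.Dict.mk (s.map (fun k => (k, f k)))).insert k (f k)
          = PySem.Dict.mk (s.map (fun k => (k, f k))) := by
        apply PySem.Dict.ext
        rw [PySem.Dict.items_insert]
        simp only [hcont, hmem, decide_true, if_true]
        show List.map _ (s.map (fun k => (k, f k))) = (PySem.Dict.mk (s.map (fun k => (k, f k)))).items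
        rw [List.map_map]
        have : ((fun (p : String × Int) => if (p.1 == k) = true then (k, f k) else p) ∘
            (fun k => (k, f k))) = (fun k => (k, f k)) := by
          funext x
          by_cases hx : x = k <;> simp [hx]
        rw [this]
      have hadd : PySem.Set.add s k = s := by simp [PySem.Set.add, PySem.Set.contains, hmem]
      simp only [List.foldl_cons, hins, ih s, PySem.Set.update, List.foldl_cons, hadd]
    · have hins : (PySem.Dict.mk (s.map (fun k => (k, f k)))).insert k (f k)
          = PySem.Dict.mk ((s ++ [k]).map (fun k => (k, f k))) := by
        apply PySem.Dict.ext
        rw [PySem.Dict.items_insert]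
        simp [hcont, hmem]
      have hadd : PySem.Set.add s k = s ++ [k] := by
        simp [PySem.Set.add, PySem.Set.contains, hmem]
      simp only [List.foldl_cons, hins, ih (s ++ [k]), PySem.Set.update, List.foldl_cons, hadd]

theorem wordCounts_alt_eq (wordList : List String) :
    wordCounts_alt wordList
      = (PySem.Set.ofList (wordList.map pvFirstUpper)).map
          (fun k => (k, ((wordList.map pvFirstUpper).count k : Int))) := by
  unfold wordCounts_alt
  have h := items_foldl_insert_fn (fun k => ((wordList.map pvFirstUpper).count k : Int))
      (PySem.List.dedup (wordList.map pvFirstUpper)) []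
  have hupd : PySem.Set.update ([] : List String) (PySem.List.dedup (wordList.map pvFirstUpper))
      = PySem.Set.ofList (wordList.map pvFirstUpper) := by
    simp [PySem.Set.update, ← PySem.Set.ofList_eq_foldl, PySem.List.dedup_eq_ofList,
      PySem.Set.ofList_ofList]
  rw [hupd] at h
  simpa [PySem.Dict.empty] using h

-- ===== VERDICT (by name: the statement is the Claim_ definition above) =====
theorem wordCounts_spec : Claim_equal_wordCounts := by
  intro wordList _ _
  show wordCounts wordList = wordCounts_alt wordList
  rw [wordCounts_eq_counter_items, wordCounts_alt_eq, PySem.Dict.items_counter]
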